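-- pv_equiv track=rewrite | github.com/shirleytxu/WFC-CSP | fixedParameterAlgorithm.py | calculateScoreboard
-- ===== SOURCE A (Python) =====
-- def calculateScoreboard(letterFreqTable, positions):
--     scoreboard = []
--     for position in positions:
--         alphabetFreqTable = letterFreqTable[position]
--         for letter, freq in alphabetFreqTable.items():
--             score = (position, letter, freq)
--             scoreboard.append(score)
--
--     scoreboard.sort(key=lambda entry: entry[2], reverse=True)
--     return scoreboard
-- ===== SOURCE B (Python) =====
-- def calculateScoreboard(letterFreqTable, positions):
--     buckets = {}
--     for position in positions:
--         for letter, freq in letterFreqTable[position].items():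
--             buckets.setdefault(freq, []).append((position, letter, freq))
--     scoreboard = []
--     for freq in sorted(buckets, reverse=True):
--         scoreboard.extend(buckets[freq])
--     return scoreboard
-- ===== Notes on version B (the rewrite author's own statement) =====
-- stated objective: alternative
-- what changed: Instead of flattening all entries and running one stable comparison sort on them, B groups entries into a dict of buckets keyed by frequency (preserving insertion order inside each bucket) and then concatenates the buckets in descending order of the distinct frequencies, sorting only the distinct frequency values.
import Mathlib
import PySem

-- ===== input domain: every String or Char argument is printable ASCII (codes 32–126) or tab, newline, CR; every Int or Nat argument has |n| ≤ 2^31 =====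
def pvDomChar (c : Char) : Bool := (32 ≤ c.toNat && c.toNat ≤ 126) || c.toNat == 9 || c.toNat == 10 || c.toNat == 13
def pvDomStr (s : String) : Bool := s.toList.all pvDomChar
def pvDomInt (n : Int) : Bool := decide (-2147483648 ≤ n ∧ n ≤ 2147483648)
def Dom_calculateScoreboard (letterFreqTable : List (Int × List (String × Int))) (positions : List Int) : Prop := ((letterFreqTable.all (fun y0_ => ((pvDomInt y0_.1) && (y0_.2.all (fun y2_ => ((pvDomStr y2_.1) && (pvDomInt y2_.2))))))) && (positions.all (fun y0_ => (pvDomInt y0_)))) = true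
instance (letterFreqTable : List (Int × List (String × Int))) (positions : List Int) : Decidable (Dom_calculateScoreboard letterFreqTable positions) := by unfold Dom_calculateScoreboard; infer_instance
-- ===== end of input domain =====

-- B replaces A's single stable reverse sort of all entries by grouping the entries into
-- frequency-keyed buckets and concatenating the buckets by descending distinct frequency
-- (objective: alternative algorithm of similar cost).

-- dict lookup letterFreqTable[position]: first matching key (total stand-in; Pre_ guarantees a hit)
def pvLookup (letterFreqTable : List (Int × List (String × Int))) (position : Int) : List (String × Int) :=
  ((letterFreqTable.find? (fun kv => kv.1 == position)).map (·.2)).getD []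

-- ===== PORT A =====
def calculateScoreboard (letterFreqTable : List (Int × List (String × Int))) (positions : List Int) : List (Int × String × Int) :=
  let scoreboard :=
    positions.foldl (fun sb position =>
      (pvLookup letterFreqTable position).foldl
        (fun sb lf => sb ++ [(position, lf.1, lf.2)]) sb) []
  PySem.List.sorted scoreboard (fun entry => entry.2.2) true

-- ===== PORT B =====
-- second loop of Source B: 'for freq in sorted(buckets, reverse=True): scoreboard.extend(buckets[freq])'
def pvEmit (buckets : PySem.Dict Int (List (Int × String × Int))) : List (Int × String × Int) :=
  (PySem.List.sorted buckets.keys (fun k => k) true).flatMap (fun freq => buckets.getD freq [])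

def calculateScoreboard_alt (letterFreqTable : List (Int × List (String × Int))) (positions : List Int) : List (Int × String × Int) :=
  pvEmit
    (positions.foldl (fun d position =>
      (pvLookup letterFreqTable position).foldl
        (fun d lf => d.modify lf.2 [] (· ++ [(position, lf.1, lf.2)])) d)
      PySem.Dict.empty)

-- ===== PRECONDITION & SPEC =====
-- Pre_: every position must be a key of letterFreqTable (otherwise A raises KeyError).
def Pre_calculateScoreboard (letterFreqTable : List (Int × List (String × Int))) (positions : List Int) : Prop :=
  ∀ p ∈ positions, letterFreqTable.any (fun kv => kv.1 == p) = true
instance (letterFreqTable : List (Int × List (String × Int))) (positions : List Int) : Decidable (Pre_calculateScoreboard letterFreqTable positions) := by unfold Pre_calculateScoreboard; infer_instance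

def pvWitness_calculateScoreboard : (List (Int × List (String × Int))) × List Int :=
  ([(0, [("a", 2), ("b", 1)]), (1, [("a", 1)])], [0, 1])

def Spec_calculateScoreboard (letterFreqTable : List (Int × List (String × Int))) (positions : List Int) (out : List (Int × String × Int)) : Prop := out = calculateScoreboard_alt letterFreqTable positions
instance (letterFreqTable : List (Int × List (String × Int))) (positions : List Int) (out : List (Int × String × Int)) : Decidable (Spec_calculateScoreboard letterFreqTable positions out) := by unfold Spec_calculateScoreboard; infer_instance

-- ===== CLAIM (what is proved, stated in full; the proofs are below) =====
def Claim_equal_calculateScoreboard : Prop := ∀ (letterFreqTable : List (Int × List (String × Int))) (positions : List Int), Dom_calculateScoreboard letterFreqTable positions → Pre_calculateScoreboard letterFreqTable positions → Spec_calculateScoreboard letterFreqTable positions (calculateScoreboard letterFreqTable positions)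

-- ===== LEMMAS AND PROOFS =====

-- insertBy passes over every element it is not "before"
theorem pv_insertBy_append_not_before {α : Type} (before : α → α → Bool) (x : α)
    (pre rest : List α) (h : ∀ y ∈ pre, before x y = false) :
    PySem.List.insertBy before x (pre ++ rest) = pre ++ PySem.List.insertBy before x rest := by
  induction pre with
  | nil => rfl
  | cons y ys ih =>
    simp only [List.cons_append, PySem.List.insertBy, h y (by simp)]
    simp only [Bool.false_eq_true, if_false, List.cons.injEq, true_and]
    exact ih (fun z hz => h z (by simp [hz]))

-- insertBy lands at the front when it is "before" everything
theorem pv_insertBy_of_forall_before {α : Type} (before : α → α → Bool) (x : α)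
    (ys : List α) (h : ∀ y ∈ ys, before x y = true) :
    PySem.List.insertBy before x ys = x :: ys := by
  cases ys with
  | nil => rfl
  | cons y ys => simp [PySem.List.insertBy, h y (by simp)]

-- buckets are well-keyed: every element of bucket g k has key k
def pvKeyed {α : Type} (key : α → Int) (g : Int → List α) (S : List Int) : Prop :=
  ∀ k ∈ S, ∀ e ∈ g k, key e = k

-- stable reverse insertion into a bucketed list, existing key: x lands at the end of its bucket
theorem pv_insertBy_flatMap_mem {α : Type} (key : α → Int) (x : α) (S : List Int)
    (g : Int → List α) (hs : S.Pairwise (fun a b => b < a)) (hg : pvKeyed key g S)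
    (hmem : key x ∈ S) :
    PySem.List.insertBy (fun a b => decide (key b < key a)) x (S.flatMap g)
      = S.flatMap (fun k => g k ++ if key x == k then [x] else []) := by
  induction S with
  | nil => simp at hmem
  | cons k0 S' ih =>
    have hlt : ∀ k ∈ S', k < k0 := fun k hk => (List.pairwise_cons.1 hs).1 k hk
    simp only [List.flatMap_cons]
    by_cases hk0 : key x = k0
    · have hnotS' : key x ∉ S' := fun hmem' => absurd (hlt _ hmem') (by simp [hk0])
      have htail : S'.flatMap (fun k => g k ++ if key x == k then [x] else [])
          = S'.flatMap g := by
        apply List.flatMap_congr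
        intro k hk
        have : (key x == k) = false := by
          simp only [beq_eq_false_iff_ne]; exact fun he => hnotS' (he ▸ hk)
        simp [this]
      rw [htail, pv_insertBy_append_not_before _ _ _ _
            (fun y hy => by simp [hg k0 (by simp) y hy, hk0]),
          pv_insertBy_of_forall_before _ _ _
            (fun y hy => by
              obtain ⟨k, hkS, hyg⟩ := List.mem_flatMap.1 hy
              have := hg k (by simp [hkS]) y hyg
              simp [this, hk0, hlt k hkS]),
          if_pos (by simp [hk0])]
      simp
    · have hmem' : key x ∈ S' := by
        rcases List.mem_cons.1 hmem with h | h
        · exact absurd h hk0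
        · exact h
      have hxlt : key x < k0 := hlt _ hmem'
      rw [pv_insertBy_append_not_before _ _ _ _
            (fun y hy => by
              have := hg k0 (by simp) y hy
              simp [this]; omega),
          ih (List.Pairwise.of_cons hs)
             (fun k hk e he => hg k (by simp [hk]) e he) hmem',
          if_neg (by simp [hk0])]
      simp

-- stable reverse insertion into a bucketed list, fresh key: a new singleton bucket appears
theorem pv_insertBy_flatMap_not_mem {α : Type} (key : α → Int) (x : α) (S : List Int)
    (g : Int → List α) (hs : S.Pairwise (fun a b => b < a)) (hg : pvKeyed key g S)
    (hmem : key x ∉ S) :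
    PySem.List.insertBy (fun a b => decide (key b < key a)) x (S.flatMap g)
      = (PySem.List.insertBy (fun a b => decide (b < a)) (key x) S).flatMap
          (fun k => if key x == k then [x] else g k) := by
  induction S with
  | nil => simp [PySem.List.insertBy]
  | cons k0 S' ih =>
    have hlt : ∀ k ∈ S', k < k0 := fun k hk => (List.pairwise_cons.1 hs).1 k hk
    have hne0 : key x ≠ k0 := fun h => hmem (by simp [h])
    by_cases hcase : k0 < key x
    · have h1 : PySem.List.insertBy (fun a b => decide (b < a)) (key x) (k0 :: S')
          = key x :: k0 :: S' := by
        simp [PySem.List.insertBy, hcase]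
      rw [h1,
          pv_insertBy_of_forall_before _ _ _
            (fun y hy => by
              obtain ⟨k, hkS, hyg⟩ := List.mem_flatMap.1 hy
              have hky := hg k hkS y hyg
              have : k ≤ k0 := by
                rcases List.mem_cons.1 hkS with h | h
                · omega
                · have := hlt k h; omega
              simp [hky]; omega)]
      have htail : (k0 :: S').flatMap (fun k => if key x == k then [x] else g k)
          = (k0 :: S').flatMap g := by
        apply List.flatMap_congr
        intro k hk
        have : (key x == k) = false := by
          simp only [beq_eq_false_iff_ne]; exact fun he => hmem (he ▸ hk)
        simp [this]
      rw [show (key x :: k0 :: S').flatMap (fun k => if key x == k then [x] else g k)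
            = [x] ++ (k0 :: S').flatMap (fun k => if key x == k then [x] else g k) from by
          simp, htail]
      simp
    · have hxlt : key x < k0 := by omega
      have h1 : PySem.List.insertBy (fun a b => decide (b < a)) (key x) (k0 :: S')
          = k0 :: PySem.List.insertBy (fun a b => decide (b < a)) (key x) S' := by
        simp [PySem.List.insertBy]; omega
      rw [List.flatMap_cons, h1, List.flatMap_cons,
          pv_insertBy_append_not_before _ _ _ _
            (fun y hy => by
              have := hg k0 (by simp) y hy
              simp [this]; omega),
          ih (List.Pairwise.of_cons hs)
             (fun k hk e he => hg k (by simp [hk]) e he)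
             (fun h => hmem (by simp [h])),
          if_neg (by simp [hne0])]

-- THE CORE: Python's stable reverse sort by an Int key equals concatenation of the
-- key-buckets in descending distinct-key order
theorem pv_sorted_rev_eq_buckets {α : Type} (key : α → Int) (l : List α) :
    PySem.List.sorted l key true
      = (PySem.List.sorted (PySem.Set.ofList (l.map key)) (fun k => k) true).flatMap
          (fun k => l.filter (fun e => key e == k)) := by
  induction l using List.reverseRecOn with
  | nil => rfl
  | append_singleton l x ih =>
    have hstep : PySem.List.sorted (l ++ [x]) key true
        = PySem.List.insertBy (fun a b => decide (key b < key a)) x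
            (PySem.List.sorted l key true) := by
      rw [PySem.List.sorted_rev_eq_foldl_insertBy, List.foldl_append,
          ← PySem.List.sorted_rev_eq_foldl_insertBy]
      rfl
    have hK : PySem.Set.ofList ((l ++ [x]).map key)
        = PySem.Set.add (PySem.Set.ofList (l.map key)) (key x) := by
      rw [List.map_append, PySem.Set.ofList_eq_foldl, List.foldl_append,
          ← PySem.Set.ofList_eq_foldl]
      rfl
    set K := PySem.Set.ofList (l.map key) with hKdef
    set S := PySem.List.sorted K (fun k => k) true with hSdef
    have hSnd : S.Nodup := ((PySem.List.sorted_perm K (fun k => k) true).nodup_iff).2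
      (PySem.Set.nodup_ofList _)
    have hSpw : S.Pairwise (fun a b => b < a) := by
      have h1 := PySem.List.sorted_pairwise_rev K (fun k => k)
      have h2 := (h1.and hSnd).imp
        (fun {a b} h => lt_of_le_of_ne h.1 (Ne.symm h.2))
      exact h2
    have hg : pvKeyed key (fun k => l.filter (fun e => key e == k)) S := by
      intro k _ e he
      have := List.of_mem_filter he
      exact eq_of_beq this
    have hmemS : key x ∈ S ↔ key x ∈ l.map key := by
      rw [hSdef, PySem.List.mem_sorted, hKdef, PySem.Set.mem_ofList]
    rw [hstep, ih, hK]
    by_cases hmem : key x ∈ l.map key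
    · have hadd : PySem.Set.add K (key x) = K := by
        simp only [PySem.Set.add, PySem.Set.contains]
        rw [if_pos (by simp [hKdef, List.contains_eq_mem, PySem.Set.mem_ofList, hmem])]
      rw [hadd, ← hSdef,
          pv_insertBy_flatMap_mem key x S _ hSpw hg (hmemS.2 hmem)]
      apply List.flatMap_congr
      intro k _
      simp [List.filter_append, List.filter_singleton]
    · have hadd : PySem.Set.add K (key x) = K ++ [key x] := by
        simp only [PySem.Set.add, PySem.Set.contains]
        rw [if_neg (by simp [hKdef, List.contains_eq_mem, PySem.Set.mem_ofList, hmem])]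
      have hS' : PySem.List.sorted (K ++ [key x]) (fun k => k) true
          = PySem.List.insertBy (fun a b => decide (b < a)) (key x) S := by
        rw [PySem.List.sorted_rev_eq_foldl_insertBy, List.foldl_append,
            ← PySem.List.sorted_rev_eq_foldl_insertBy]
        rfl
      rw [hadd, hS',
          pv_insertBy_flatMap_not_mem key x S _ hSpw hg (fun h => hmem (hmemS.1 h))]
      apply List.flatMap_congr
      intro k hk
      rcases (PySem.List.mem_insertBy _ _ _ _).1 hk with h | h
      · have : (key x == k) = true := by simp [h]
        rw [if_pos this]
        have hempty : l.filter (fun e => key e == k) = [] := by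
          rw [List.filter_eq_nil_iff]
          intro e he hbe
          exact hmem (h ▸ (eq_of_beq hbe) ▸ List.mem_map_of_mem he)
        simp [List.filter_append, hempty, this]
      · have hne : (key x == k) = false := by
          simp only [beq_eq_false_iff_ne]
          exact fun he => (fun hh => hmem (hmemS.1 hh)) (he ▸ h)
        rw [if_neg (by simp [hne])]
        simp [List.filter_append, hne]

-- the flat list of entries both programs traverse
def pvEntries (letterFreqTable : List (Int × List (String × Int))) (positions : List Int) : List (Int × String × Int) :=
  positions.flatMap (fun position =>
    (pvLookup letterFreqTable position).map (fun lf => (position, lf.1, lf.2)))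

theorem pv_A_eq (letterFreqTable : List (Int × List (String × Int))) (positions : List Int) :
    calculateScoreboard letterFreqTable positions
      = PySem.List.sorted (pvEntries letterFreqTable positions) (fun e => e.2.2) true := by
  unfold calculateScoreboard pvEntries
  simp only [PySem.List.foldl_append_singleton_eq_map, PySem.List.foldl_append_eq_flatMap,
    List.nil_append]

theorem pv_B_buckets (letterFreqTable : List (Int × List (String × Int))) (positions : List Int) :
    positions.foldl (fun d position =>
      (pvLookup letterFreqTable position).foldl
        (fun d lf => d.modify lf.2 [] (· ++ [(position, lf.1, lf.2)])) d)
      PySem.Dict.empty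
    = (pvEntries letterFreqTable positions).foldl
        (fun d e => d.modify e.2.2 [] (· ++ [e])) PySem.Dict.empty := by
  unfold pvEntries
  rw [List.foldl_flatMap]
  simp only [List.foldl_map]

theorem pv_spec_aux (letterFreqTable : List (Int × List (String × Int))) (positions : List Int) :
    calculateScoreboard letterFreqTable positions
      = calculateScoreboard_alt letterFreqTable positions := by
  unfold calculateScoreboard_alt pvEmit
  rw [pv_B_buckets, pv_A_eq]
  set es := pvEntries letterFreqTable positions with hes
  have hfold : es.foldl (fun d e => d.modify e.2.2 [] (· ++ [e])) PySem.Dict.empty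
      = (es.map (fun e => (e.2.2, e))).foldl
          (fun d p => d.modify p.1 [] (· ++ [p.2])) PySem.Dict.empty := by
    rw [List.foldl_map]
  have hkeys : (es.foldl (fun d e => d.modify e.2.2 [] (· ++ [e])) PySem.Dict.empty).keys
      = PySem.Set.ofList (es.map (fun e => e.2.2)) := by
    rw [PySem.Dict.keys_foldl_modify_key es (fun e => e.2.2) []
         (fun _ e v => v ++ [e]) PySem.Dict.empty]
    rw [PySem.Dict.keys_empty, PySem.Set.ofList_eq_foldl]
    rfl
  have hgetD : ∀ k, (es.foldl (fun d e => d.modify e.2.2 [] (· ++ [e])) PySem.Dict.empty).getD k []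
      = es.filter (fun e => e.2.2 == k) := by
    intro k
    rw [hfold, PySem.Dict.getD_foldl_modify_append]
    rw [PySem.Dict.getD_empty, List.filter_map]
    simp [Function.comp_def]
  rw [hkeys]
  calc PySem.List.sorted es (fun e => e.2.2) true
      = (PySem.List.sorted (PySem.Set.ofList (es.map (fun e => e.2.2))) (fun k => k) true).flatMap
          (fun k => es.filter (fun e => e.2.2 == k)) := pv_sorted_rev_eq_buckets _ es
    _ = _ := by
        apply List.flatMap_congr
        intro k _
        rw [hgetD k]

-- ===== VERDICT (by name: the statement is the Claim_ definition above) =====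
theorem calculateScoreboard_spec : Claim_equal_calculateScoreboard := by
  intro lft positions _ _
  unfold Spec_calculateScoreboard
  exact pv_spec_aux lft positions
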